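-- pv_equiv track=rewrite | github.com/icakaxd/Software-University | PythonAdvanced/02.Tuples And Sets/Lab/02.Average_Student_Grades.py | count_students_marks
-- ===== SOURCE A (Python) =====
-- def count_students_marks(values):
--     student_marks = {}
--
--     for value in values:
--         (student, mark) = value.split()
--         if student not in student_marks:
--             student_marks[student] = []
--         student_marks[student].append(mark)
--
--     return student_marks
-- ===== SOURCE B (Python) =====
-- def count_students_marks(values):
--     pairs = []
--     for value in values:
--         (student, mark) = value.split()
--         pairs.append((student, mark))
--     return {s: [m for (t, m) in pairs if t == s]
--             for s in dict.fromkeys(s for (s, _) in pairs)}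
-- ===== Notes on version B (the rewrite author's own statement) =====
-- stated objective: alternative
-- what changed: A builds the dict incrementally in one loop (insert-if-absent then append per line); B first parses all lines into (student, mark) pairs, dedups the student names in first-appearance order via dict.fromkeys, and builds each student's mark list by a separate filter pass over the parsed pairs.
import Mathlib
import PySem

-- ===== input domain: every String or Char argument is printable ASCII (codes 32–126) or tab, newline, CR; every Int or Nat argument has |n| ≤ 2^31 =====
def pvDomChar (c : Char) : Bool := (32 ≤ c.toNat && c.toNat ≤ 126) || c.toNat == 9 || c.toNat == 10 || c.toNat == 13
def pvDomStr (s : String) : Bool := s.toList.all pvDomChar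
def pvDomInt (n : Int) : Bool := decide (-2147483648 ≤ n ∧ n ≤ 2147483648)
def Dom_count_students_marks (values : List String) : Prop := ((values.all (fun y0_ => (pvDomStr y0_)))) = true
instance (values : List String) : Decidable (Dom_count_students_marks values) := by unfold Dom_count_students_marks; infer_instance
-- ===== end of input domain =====

-- B replaces A's incremental dict-building loop by a parse pass + ordered key dedup + one filter pass per distinct student (alternative decomposition, same results).

-- ===== PORT A =====
-- A: one fold over the lines, growing an insertion-ordered dict student ↦ marks.
def count_students_marks (values : List String) : List (String × List String) :=
  (values.foldl (fun (d : PySem.Dict String (List String)) value =>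
      match PySem.Str.split₀ value with
      | [student, mark] =>
          let d' := if d.contains student then d else d.insert student []
          d'.modify student [] (· ++ [mark])
      | _ => d)  -- unreachable under Pre_ (Python raises ValueError at the tuple unpacking)
    PySem.Dict.empty).items

-- ===== PORT B =====
-- B: parse all lines into pairs, then map each first-appearance-deduped student to the marks filtered from the pair list.
def count_students_marks_alt (values : List String) : List (String × List String) :=
  let pairs := values.foldl (fun (acc : List (String × String)) value =>
      let ws := PySem.Str.split₀ value
      if ws.length = 2 then acc ++ [(ws[0]!, ws[1]!)]
      else acc) []  -- 'else' unreachable under Pre_ (Python raises ValueError at the tuple unpacking)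
  (PySem.List.dedup (pairs.map Prod.fst)).map
    (fun s => (s, (pairs.filter (fun p => p.1 == s)).map Prod.snd))

-- ===== PRECONDITION & SPEC =====
-- Pre_ excludes exactly the lines that do not split into two whitespace-separated tokens,
-- where both Pythons raise ValueError at the tuple unpacking.
def Pre_count_students_marks (values : List String) : Prop :=
  ∀ v ∈ values, (PySem.Str.split₀ v).length = 2
instance (values : List String) : Decidable (Pre_count_students_marks values) := by unfold Pre_count_students_marks; infer_instance

def pvWitness_count_students_marks : List String := ["Ann 5", "Bob 3", "Ann 6"]

def Spec_count_students_marks (values : List String) (out : List (String × List String)) : Prop := out = count_students_marks_alt values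
instance (values : List String) (out : List (String × List String)) : Decidable (Spec_count_students_marks values out) := by unfold Spec_count_students_marks; infer_instance

-- ===== CLAIM (what is proved, stated in full; the proofs are below) =====
def Claim_equal_count_students_marks : Prop := ∀ (values : List String), Dom_count_students_marks values → Pre_count_students_marks values → Spec_count_students_marks values (count_students_marks values)

-- ===== LEMMAS AND PROOFS =====

-- A's loop body (as in the port) and the two building blocks it decomposes into.
def pvStepA (d : PySem.Dict String (List String)) (value : String) : PySem.Dict String (List String) :=
  match PySem.Str.split₀ value with
  | [student, mark] =>
      let d' := if d.contains student then d else d.insert student []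
      d'.modify student [] (· ++ [mark])
  | _ => d

def pvStepP (acc : List (String × String)) (value : String) : List (String × String) :=
  let ws := PySem.Str.split₀ value
  if ws.length = 2 then acc ++ [(ws[0]!, ws[1]!)]
  else acc

def pvStepM (d : PySem.Dict String (List String)) (p : String × String) : PySem.Dict String (List String) :=
  d.modify p.1 [] (· ++ [p.2])

theorem pv_insert_modify_absent (d : PySem.Dict String (List String)) (s m : String)
    (h : d.contains s = false) :
    (d.insert s []).modify s [] (· ++ [m]) = d.modify s [] (· ++ [m]) := by
  simp only [PySem.Dict.modify, PySem.Dict.getD_insert_self,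
    PySem.Dict.getD_of_not_contains _ _ h, PySem.Dict.insert_insert_self]

theorem pv_stepA_eq (d : PySem.Dict String (List String)) (v : String)
    (h : (PySem.Str.split₀ v).length = 2) :
    pvStepA d v = pvStepM d ((PySem.Str.split₀ v)[0]!, (PySem.Str.split₀ v)[1]!) := by
  match hsp : PySem.Str.split₀ v with
  | [s, m] =>
    simp only [pvStepA, pvStepM, hsp]
    by_cases hc : d.contains s = true
    · simp [hc]
    · simp only [Bool.not_eq_true] at hc
      simp [hc, pv_insert_modify_absent d s m hc]
  | [] => simp [hsp] at h
  | [s] => simp [hsp] at h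
  | s :: m :: x :: r => simp [hsp] at h

theorem pv_foldP_acc (vs : List String) : ∀ acc : List (String × String),
    vs.foldl pvStepP acc = acc ++ vs.foldl pvStepP [] := by
  induction vs with
  | nil => simp
  | cons v vs ih =>
    intro acc
    simp only [List.foldl_cons]
    rw [ih, ih (pvStepP [] v)]
    have : pvStepP acc v = acc ++ pvStepP [] v := by
      by_cases h : (PySem.Str.split₀ v).length = 2 <;> simp [pvStepP, h]
    rw [this, List.append_assoc]

theorem pv_foldA_eq_foldM (vs : List String) : ∀ d : PySem.Dict String (List String),
    (∀ v ∈ vs, (PySem.Str.split₀ v).length = 2) →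
    vs.foldl pvStepA d = (vs.foldl pvStepP []).foldl pvStepM d := by
  induction vs with
  | nil => intro d _; rfl
  | cons v vs ih =>
    intro d hpre
    have hv := hpre v (by simp)
    have hrest : ∀ u ∈ vs, (PySem.Str.split₀ u).length = 2 := fun u hu => hpre u (by simp [hu])
    simp only [List.foldl_cons]
    rw [ih _ hrest, pv_stepA_eq d v hv, pv_foldP_acc vs (pvStepP [] v)]
    have hstep : pvStepP [] v = [((PySem.Str.split₀ v)[0]!, (PySem.Str.split₀ v)[1]!)] := by
      simp [pvStepP, hv]
    rw [hstep]
    rfl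

-- the grouped dict of a pair list, as B computes it
theorem pv_foldM_items (ps : List (String × String)) :
    (ps.foldl pvStepM PySem.Dict.empty).items
    = (PySem.List.dedup (ps.map Prod.fst)).map
        (fun s => (s, (ps.filter (fun p => p.1 == s)).map Prod.snd)) := by
  have hnd : (ps.foldl pvStepM PySem.Dict.empty).keys.Nodup := by
    unfold pvStepM
    exact PySem.Dict.nodup_keys_foldl_modify_key ps Prod.fst [] _ _ PySem.Dict.nodup_keys_empty
  have hkeys : (ps.foldl pvStepM PySem.Dict.empty).keys
      = PySem.Set.ofList (ps.map Prod.fst) := by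
    unfold pvStepM
    rw [PySem.Dict.keys_foldl_modify_key]
    simp [PySem.Set.update, PySem.Set.ofList_eq_foldl, PySem.Dict.keys_empty]
  have hget : ∀ s, (ps.foldl pvStepM PySem.Dict.empty).getD s []
      = (ps.filter (fun p => p.1 == s)).map Prod.snd := by
    intro s
    unfold pvStepM
    rw [PySem.Dict.getD_foldl_modify_append]
    simp [PySem.Dict.getD_empty]
  rw [PySem.Dict.items_eq_map_keys _ hnd [], hkeys, PySem.List.dedup_eq_ofList]
  exact List.map_congr_left (fun s _ => by rw [hget s])

-- ===== VERDICT (by name: the statement is the Claim_ definition above) =====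
theorem count_students_marks_spec : Claim_equal_count_students_marks := by
  intro values _ hpre
  unfold Spec_count_students_marks count_students_marks count_students_marks_alt
  rw [show (fun (d : PySem.Dict String (List String)) value =>
        match PySem.Str.split₀ value with
        | [student, mark] =>
            let d' := if d.contains student then d else d.insert student []
            d'.modify student [] (· ++ [mark])
        | _ => d) = pvStepA from rfl,
      show (fun (acc : List (String × String)) value =>
        let ws := PySem.Str.split₀ value
        if ws.length = 2 then acc ++ [(ws[0]!, ws[1]!)]
        else acc) = pvStepP from rfl,
      pv_foldA_eq_foldM values PySem.Dict.empty hpre,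
      pv_foldM_items]
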